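-- pv_equiv track=rewrite | github.com/pypi-data/pypi-mirror-375 | packages/forkscout/forkscout-1.0.5-py3-none-any.whl/forkscout/reporting/csv_exporter.py | _extract_commits_ahead
-- ===== SOURCE A (Python) =====
-- def _extract_commits_ahead(commits_ahead_str: str) -> str:
--     """Extract commits ahead count from combined format like '+5 -2' or '+5'."""
--     if not commits_ahead_str:
--         return ""
--
--     # Handle formats like "+5 -2", "+5", "-2", or just "5"
--     commits_ahead_str = str(commits_ahead_str).strip()
--
--     if '+' in commits_ahead_str:
--         # Extract the number after '+'
--         parts = commits_ahead_str.split()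
--         for part in parts:
--             if part.startswith('+'):
--                 return part[1:]  # Remove the '+' sign
--     elif commits_ahead_str.isdigit():
--         return commits_ahead_str
--
--     return ""
-- ===== SOURCE B (Python) =====
-- def _extract_commits_ahead(commits_ahead_str: str) -> str:
--     """Extract commits ahead count via a single left-to-right character scan."""
--     if not commits_ahead_str:
--         return ""
--     s = str(commits_ahead_str).strip()
--     prev_space = True
--     for i, c in enumerate(s):
--         if c == '+' and prev_space:
--             tail = s[i + 1:]
--             j = 0
--             while j < len(tail) and not tail[j].isspace():
--                 j += 1
--             return tail[:j]
--         prev_space = c.isspace()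
--     return s if s.isdigit() else ""
-- ===== Notes on version B (the rewrite author's own statement) =====
-- stated objective: alternative
-- what changed: Replaces A's substring test plus whitespace-split plus token loop by a single left-to-right character scan that finds the first token-initial plus sign and returns the following non-space run.
import Mathlib
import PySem

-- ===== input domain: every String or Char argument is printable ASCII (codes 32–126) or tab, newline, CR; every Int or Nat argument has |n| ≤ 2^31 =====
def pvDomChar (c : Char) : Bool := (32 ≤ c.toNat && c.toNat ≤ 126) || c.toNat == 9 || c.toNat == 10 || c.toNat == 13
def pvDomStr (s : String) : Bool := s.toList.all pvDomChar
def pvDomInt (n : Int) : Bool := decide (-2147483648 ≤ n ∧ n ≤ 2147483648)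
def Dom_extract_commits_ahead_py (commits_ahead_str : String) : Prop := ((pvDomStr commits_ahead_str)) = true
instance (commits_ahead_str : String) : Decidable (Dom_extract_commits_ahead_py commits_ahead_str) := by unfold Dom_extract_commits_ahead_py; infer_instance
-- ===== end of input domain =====

-- B replaces A's split-then-token-loop by a single character scan (alternative decomposition, same cost).

-- ===== PORT A =====
-- the 'for part in parts: if part.startswith("+"): return part[1:]' loop; falls through to ""
def pvALoop : List (List Char) → List Char
  | [] => []
  | p :: rest =>
      if PySem.Chars.startswith p ['+'] then PySem.List.slice p (some 1) none
      else pvALoop rest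

def extract_commits_ahead_py (commits_ahead_str : String) : String :=
  if commits_ahead_str = "" then ""
  else
    let t := PySem.Chars.strip commits_ahead_str.toList
    if PySem.Chars.isIn ['+'] t then String.ofList (pvALoop (PySem.Chars.split₀ t))
    else if PySem.Chars.strIsdigit t then String.ofList t
    else ""

-- ===== PORT B =====
def pvNotSpace (c : Char) : Bool := !PySem.Chars.isspace c

-- the 'for i, c in enumerate(s)' scan; prevSpace tracks whether the previous char was whitespace;
-- the inner while-loop 'tail[:j]' is the maximal non-space prefix, i.e. takeWhile
def pvBScan : Bool → List Char → Option (List Char)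
  | _, [] => none
  | prevSpace, c :: rest =>
      if c = '+' ∧ prevSpace = true then some (rest.takeWhile pvNotSpace)
      else pvBScan (PySem.Chars.isspace c) rest

def extract_commits_ahead_py_alt (commits_ahead_str : String) : String :=
  if commits_ahead_str = "" then ""
  else
    let t := PySem.Chars.strip commits_ahead_str.toList
    match pvBScan true t with
    | some r => String.ofList r
    | none => if PySem.Chars.strIsdigit t then String.ofList t else ""

-- ===== PRECONDITION & SPEC =====
def Spec_extract_commits_ahead_py (commits_ahead_str : String) (out : String) : Prop := out = extract_commits_ahead_py_alt commits_ahead_str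
instance (commits_ahead_str : String) (out : String) : Decidable (Spec_extract_commits_ahead_py commits_ahead_str out) := by unfold Spec_extract_commits_ahead_py; infer_instance

-- ===== CLAIM (what is proved, stated in full; the proofs are below) =====
def Claim_equal_extract_commits_ahead_py : Prop := ∀ (commits_ahead_str : String), Dom_extract_commits_ahead_py commits_ahead_str → Spec_extract_commits_ahead_py commits_ahead_str (extract_commits_ahead_py commits_ahead_str)

-- ===== LEMMAS AND PROOFS =====

-- the clean word splitter split₀ computes
def pvWords : List Char → List (List Char)
  | [] => []
  | c :: r =>
      if PySem.Chars.isspace c then pvWords r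
      else (c :: r.takeWhile pvNotSpace) :: pvWords (r.dropWhile pvNotSpace)
termination_by l => l.length
decreasing_by
  · simp
  · exact Nat.lt_succ_of_le (List.length_dropWhile_le _ _)

theorem pvGo_eq (rest : List Char) : ∀ (cur : List Char) (accs : List (List Char)),
    PySem.Chars.split₀.go rest cur accs =
      accs.reverse ++ (if cur = [] then pvWords rest
        else (cur.reverse ++ rest.takeWhile pvNotSpace) :: pvWords (rest.dropWhile pvNotSpace)) := by
  induction rest with
  | nil =>
      intro cur accs
      rcases eq_or_ne cur [] with h | h <;>
        simp [PySem.Chars.split₀.go, h, pvWords, List.isEmpty_iff]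
  | cons c r ih =>
      intro cur accs
      by_cases hsp : PySem.Chars.isspace c = true
      · rcases eq_or_ne cur [] with h | h
        · simp [PySem.Chars.split₀.go, hsp, h, ih, pvWords]
        · simp [PySem.Chars.split₀.go, hsp, h, ih, pvWords,
            List.takeWhile, List.dropWhile, pvNotSpace]
      · simp [PySem.Chars.split₀.go, hsp, ih, pvWords,
          List.takeWhile, List.dropWhile, pvNotSpace]

theorem pvSplit₀_eq (t : List Char) : PySem.Chars.split₀ t = pvWords t := by
  simp [PySem.Chars.split₀, pvGo_eq]

theorem pvBScan_false (r : List Char) :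
    pvBScan false r = pvBScan true (r.dropWhile pvNotSpace) := by
  induction r with
  | nil => rfl
  | cons d r ih =>
      by_cases hsp : PySem.Chars.isspace d = true
      · have hd : d ≠ '+' := by
          intro h; rw [h] at hsp; exact absurd hsp (by decide)
        simp [pvBScan, hsp, hd, List.dropWhile, pvNotSpace]
      · simp [pvBScan, hsp, ih, List.dropWhile, pvNotSpace]

theorem pvBScan_none (t : List Char) (h : '+' ∉ t) (prev : Bool) : pvBScan prev t = none := by
  induction t generalizing prev with
  | nil => rfl
  | cons c r ih =>
      have hc : c ≠ '+' := fun hc => h (hc ▸ List.mem_cons_self ..)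
      have hr : '+' ∉ r := fun hr => h (List.mem_cons_of_mem _ hr)
      simp [pvBScan, hc, ih hr]

theorem pvMain (t : List Char) :
    pvALoop (pvWords t) = (pvBScan true t).getD [] := by
  induction t using pvWords.induct with
  | case1 => simp [pvWords, pvALoop, pvBScan]
  | case2 c r hsp ih =>
      have hc : c ≠ '+' := by
        intro h; rw [h] at hsp; exact absurd hsp (by decide)
      simp [pvWords, pvBScan, hsp, hc, ih]
  | case3 c r hsp ih =>
      by_cases hc : c = '+'
      · subst hc
        simp [pvWords, pvBScan, hsp, pvALoop, PySem.Chars.startswith,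
          PySem.List.slice_from]
      · have hpre : PySem.Chars.startswith (c :: r.takeWhile pvNotSpace) ['+'] = false := by
          simp only [PySem.Chars.startswith, List.isPrefixOf, Bool.and_eq_false_iff,
            beq_eq_false_iff_ne, ne_eq]
          exact Or.inl fun h => hc h.symm
        simp only [pvWords, hsp, pvALoop, hpre, Bool.false_eq_true, ite_false]
        rw [ih]
        have : pvBScan true (c :: r) = pvBScan false r := by
          simp [pvBScan, hc, hsp]
        rw [this, pvBScan_false]

-- ===== VERDICT (by name: the statement is the Claim_ definition above) =====
theorem pvIsIn_true {t : List Char} (h : PySem.Chars.isIn ['+'] t = true) : '+' ∈ t := by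
  rw [PySem.Chars.isIn_iff_infix, List.singleton_infix_iff] at h; exact h

theorem pvStrIsdigit_false {t : List Char} (h : '+' ∈ t) :
    PySem.Chars.strIsdigit t = false := by
  simp [PySem.Chars.strIsdigit]
  intro _
  exact ⟨'+', h, by decide⟩

theorem extract_commits_ahead_py_spec : Claim_equal_extract_commits_ahead_py := by
  intro s _
  unfold Spec_extract_commits_ahead_py extract_commits_ahead_py extract_commits_ahead_py_alt
  by_cases hs : s = ""
  · simp [hs]
  · simp only [hs, if_false]
    set t := PySem.Chars.strip s.toList with ht
    by_cases hplus : PySem.Chars.isIn ['+'] t = true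
    · rw [if_pos hplus, pvSplit₀_eq, pvMain]
      cases hb : pvBScan true t with
      | some r => simp
      | none =>
          simp [pvStrIsdigit_false (pvIsIn_true hplus)]
    · have hmem : '+' ∉ t := fun hm =>
        hplus ((PySem.Chars.isIn_iff_infix ['+'] t).mpr ((List.singleton_infix_iff '+' t).mpr hm))
      rw [if_neg hplus, pvBScan_none t hmem true]
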